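-- pv_equiv track=rewrite | github.com/gentle1999/MolOP | tests/test_g16log_link1_metadata.py | _split_raw_gaussian_blocks
-- ===== SOURCE A (Python) =====
-- def _split_raw_gaussian_blocks(file_content: str) -> tuple[str, list[str]]:
--     split_token = "Input orientation:"
--     if split_token not in file_content:
--         split_token = "Standard orientation:"
--     parts = file_content.split(split_token)
--     header = parts[0]
--     frames = [f"{split_token}{fragment}" for fragment in parts[1:]]
--     return header, frames
-- ===== SOURCE B (Python) =====
-- def _split_raw_gaussian_blocks(file_content: str) -> tuple[str, list[str]]:
--     token = "Input orientation:"
--     i = file_content.find(token)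
--     if i == -1:
--         token = "Standard orientation:"
--         i = file_content.find(token)
--     if i == -1:
--         return file_content, []
--     header = file_content[:i]
--     frames = []
--     pos = i
--     step = len(token)
--     while True:
--         nxt = file_content.find(token, pos + step)
--         if nxt == -1:
--             frames.append(file_content[pos:])
--             return header, frames
--         frames.append(file_content[pos:nxt])
--         pos = nxt
-- ===== Notes on version B (the rewrite author's own statement) =====
-- stated objective: alternative
-- what changed: B never calls str.split: it walks the string with str.find from the previous cut, slicing each frame from one token occurrence to the next, so frames are taken directly as slices instead of re-prepending the token to split fragments.
import Mathlib
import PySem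

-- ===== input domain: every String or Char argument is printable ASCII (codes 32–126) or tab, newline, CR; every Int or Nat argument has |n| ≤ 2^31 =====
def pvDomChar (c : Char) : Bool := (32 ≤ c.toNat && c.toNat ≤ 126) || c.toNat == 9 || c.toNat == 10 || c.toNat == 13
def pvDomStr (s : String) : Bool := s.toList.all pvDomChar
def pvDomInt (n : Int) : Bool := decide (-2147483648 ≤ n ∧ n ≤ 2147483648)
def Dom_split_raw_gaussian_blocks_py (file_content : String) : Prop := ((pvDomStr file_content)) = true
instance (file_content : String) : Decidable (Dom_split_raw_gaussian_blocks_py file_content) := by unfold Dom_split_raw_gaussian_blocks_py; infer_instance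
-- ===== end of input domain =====

-- B splits by scanning with find from the previous cut instead of str.split; equal return value, alternative decomposition (no speed claim).

-- ===== PORT A =====
-- A: pick the token by membership, str.split on it, re-prepend the token to every fragment after the first.
def split_raw_gaussian_blocks_py (file_content : String) : String × List String :=
  let split_token : List Char :=
    if PySem.Str.isIn "Input orientation:" file_content then "Input orientation:".toList
    else "Standard orientation:".toList
  let parts : List (List Char) := PySem.Chars.splitOn file_content.toList split_token
  let header : List Char := parts.headD []   -- parts[0]; split never returns an empty list
  let frames : List (List Char) := parts.tail.map (fun fragment => split_token ++ fragment)
  (String.ofList header, frames.map String.ofList)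

-- ===== PORT B =====
-- B's while-True loop: fuel = s.length + 1 always suffices (pos strictly grows each step)
def pvBLoop (s tok : List Char) (fuel : Nat) (pos : Nat) (acc : List (List Char)) : List (List Char) :=
  match fuel with
  | 0 => acc ++ [s.drop pos]
  | fuel + 1 =>
    let nxt := PySem.Chars.findFrom s tok ((pos : Int) + (tok.length : Int)) none
    if nxt = -1 then acc ++ [s.drop pos]
    else pvBLoop s tok fuel nxt.toNat (acc ++ [PySem.List.slice s (some (pos : Int)) (some nxt)])

def split_raw_gaussian_blocks_py_alt (file_content : String) : String × List String :=
  let s := file_content.toList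
  let i1 := PySem.Chars.find s "Input orientation:".toList
  let ti : (List Char) × Int :=
    if i1 = -1 then ("Standard orientation:".toList, PySem.Chars.find s "Standard orientation:".toList)
    else ("Input orientation:".toList, i1)
  if ti.2 = -1 then (file_content, [])
  else
    let header := PySem.List.slice s none (some ti.2)
    let frames := pvBLoop s ti.1 (s.length + 1) ti.2.toNat []
    (String.ofList header, frames.map String.ofList)

-- ===== PRECONDITION & SPEC =====
def Spec_split_raw_gaussian_blocks_py (file_content : String) (out : String × List String) : Prop := out = split_raw_gaussian_blocks_py_alt file_content
instance (file_content : String) (out : String × List String) : Decidable (Spec_split_raw_gaussian_blocks_py file_content out) := by unfold Spec_split_raw_gaussian_blocks_py; infer_instance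

-- ===== CLAIM (what is proved, stated in full; the proofs are below) =====
def Claim_equal_split_raw_gaussian_blocks_py : Prop := ∀ (file_content : String), Dom_split_raw_gaussian_blocks_py file_content → Spec_split_raw_gaussian_blocks_py file_content (split_raw_gaussian_blocks_py file_content)

-- ===== LEMMAS AND PROOFS =====

-- Reference splitter: first occurrence via find, then recurse past it.
def pvSplitF (tok l : List Char) : List (List Char) :=
  if h : PySem.Chars.find l tok = -1 ∨ tok = [] then [l]
  else
    l.take (PySem.Chars.find l tok).toNat ::
      pvSplitF tok (l.drop ((PySem.Chars.find l tok).toNat + tok.length))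
termination_by l.length
decreasing_by
  simp only [not_or] at h
  obtain ⟨hf, htok⟩ := h
  have hnn : 0 ≤ PySem.Chars.find l tok := by
    rcases (PySem.Chars.neg_one_le_find l tok).lt_or_eq with h' | h'
    · omega
    · exact absurd h'.symm hf
  have hlen := (PySem.Chars.find_spec (s := l) (sub := tok) hnn).1.length_le
  have htk : 0 < tok.length := List.length_pos_of_ne_nil htok
  simp only [List.length_drop] at *
  omega

lemma pvSplitF_ne_nil (tok l : List Char) : pvSplitF tok l ≠ [] := by
  unfold pvSplitF
  split <;> simp

-- prepend to the head of a nonempty list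
def pvModHead (p : List Char) : List (List Char) → List (List Char)
  | [] => []
  | x :: xs => (p ++ x) :: xs

lemma pv_findgo_shift (tok : List Char) (htok : tok ≠ []) :
    ∀ (l : List Char) (k : Nat), PySem.Chars.find.go tok l k =
      if PySem.Chars.find.go tok l 0 = -1 then -1 else PySem.Chars.find.go tok l 0 + k := by
  intro l
  induction l with
  | nil => intro k; simp [PySem.Chars.find.go, htok]
  | cons c rest ih =>
    intro k
    by_cases hp : tok.isPrefixOf (c :: rest)
    · simp [PySem.Chars.find.go, hp]
    · rw [show PySem.Chars.find.go tok (c :: rest) k = PySem.Chars.find.go tok rest (k + 1) from by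
        simp [PySem.Chars.find.go, hp]]
      rw [show PySem.Chars.find.go tok (c :: rest) 0 = PySem.Chars.find.go tok rest 1 from by
        simp [PySem.Chars.find.go, hp]]
      rw [ih (k + 1), ih 1]
      have hge : -1 ≤ PySem.Chars.find.go tok rest 0 := PySem.Chars.neg_one_le_find rest tok
      split
      · rfl
      · rw [if_neg (by omega)]
        push_cast
        ring

lemma pv_find_cons (tok : List Char) (htok : tok ≠ []) (c : Char) (rest : List Char)
    (hp : ¬ tok.isPrefixOf (c :: rest)) :
    PySem.Chars.find (c :: rest) tok =
      if PySem.Chars.find rest tok = -1 then -1 else PySem.Chars.find rest tok + 1 := by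
  show PySem.Chars.find.go tok (c :: rest) 0 = _
  rw [show PySem.Chars.find.go tok (c :: rest) 0 = PySem.Chars.find.go tok rest 1 from by
    simp [PySem.Chars.find.go, hp]]
  rw [pv_findgo_shift tok htok rest 1]
  rfl

lemma pvSplitF_cons (tok : List Char) (htok : tok ≠ []) (c : Char) (rest : List Char)
    (hp : ¬ tok.isPrefixOf (c :: rest)) :
    pvSplitF tok (c :: rest) =
      (match pvSplitF tok rest with
       | [] => []
       | x :: xs => (c :: x) :: xs) := by
  have hfc := pv_find_cons tok htok c rest hp
  by_cases hf : PySem.Chars.find rest tok = -1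
  · have hl : pvSplitF tok (c :: rest) = [c :: rest] := by rw [pvSplitF]; simp [hfc, hf]
    have hr : pvSplitF tok rest = [rest] := by rw [pvSplitF]; simp [hf]
    rw [hl, hr]
  · have hnn : 0 ≤ PySem.Chars.find rest tok := by
      rcases (PySem.Chars.neg_one_le_find rest tok).lt_or_eq with h' | h'
      · omega
      · exact absurd h'.symm hf
    set j := (PySem.Chars.find rest tok).toNat with hj
    have hfind : PySem.Chars.find (c :: rest) tok = PySem.Chars.find rest tok + 1 := by
      rw [hfc]; simp [hf]
    have htn : (PySem.Chars.find (c :: rest) tok).toNat = j + 1 := by omega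
    have hl : pvSplitF tok (c :: rest) =
        (c :: rest.take j) :: pvSplitF tok (rest.drop (j + tok.length)) := by
      conv_lhs => rw [pvSplitF]
      have hne : ¬ (PySem.Chars.find (c :: rest) tok = -1 ∨ tok = []) := by
        simp only [not_or]
        exact ⟨by omega, htok⟩
      rw [dif_neg hne, htn]
      simp [Nat.add_right_comm]
    have hr : pvSplitF tok rest = rest.take j :: pvSplitF tok (rest.drop (j + tok.length)) := by
      conv_lhs => rw [pvSplitF]
      have hne : ¬ (PySem.Chars.find rest tok = -1 ∨ tok = []) := by
        simp only [not_or]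
        exact ⟨hf, htok⟩
      rw [dif_neg hne]
    rw [hl, hr]

lemma pv_splitOn_go_eq (tok : List Char) (htok : tok ≠ []) :
    ∀ (n : Nat) (l cur : List Char) (acc : List (List Char)), l.length < n →
      PySem.Chars.splitOn.go tok n l cur acc = acc.reverse ++ pvModHead cur.reverse (pvSplitF tok l) := by
  intro n
  induction n with
  | zero => intro l cur acc h; omega
  | succ m ih =>
    intro l cur acc h
    cases l with
    | nil =>
      rw [show PySem.Chars.splitOn.go tok (m + 1) [] cur acc = (cur.reverse :: acc).reverse from by
        simp [PySem.Chars.splitOn.go]]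
      have : pvSplitF tok [] = [[]] := by
        unfold pvSplitF
        have : PySem.Chars.find [] tok = -1 := by
          rw [PySem.Chars.find_eq_neg_one_iff]
          intro hinf
          have := hinf.length_le
          simp at this
          exact htok this
        simp [this]
      simp [this, pvModHead]
    | cons c rest =>
      by_cases hp : tok.isPrefixOf (c :: rest)
      · rw [show PySem.Chars.splitOn.go tok (m + 1) (c :: rest) cur acc =
          PySem.Chars.splitOn.go tok m (List.drop tok.length (c :: rest)) [] (cur.reverse :: acc) from by
            rw [PySem.Chars.splitOn.go]; simp [hp]]
        have htk : 0 < tok.length := List.length_pos_of_ne_nil htok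
        have hlt : (List.drop tok.length (c :: rest)).length < m := by
          simp only [List.length_drop]
          simp at h ⊢
          omega
        rw [ih _ [] (cur.reverse :: acc) hlt]
        have hfind : PySem.Chars.find (c :: rest) tok = 0 := by
          have h0 : tok <+: (c :: rest) := List.isPrefixOf_iff_prefix.mp hp
          have hnn : 0 ≤ PySem.Chars.find (c :: rest) tok := by
            rw [PySem.Chars.find_nonneg_iff]
            exact h0.isInfix
          have hsp := PySem.Chars.find_spec (s := c :: rest) (sub := tok) hnn
          rcases Nat.eq_zero_or_pos (PySem.Chars.find (c :: rest) tok).toNat with hz | hpos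
          · omega
          · exact absurd (by simpa using h0) (hsp.2 0 hpos)
        have hsplit : pvSplitF tok (c :: rest) =
            [] :: pvSplitF tok (List.drop tok.length (c :: rest)) := by
          rw [pvSplitF]
          have : ¬ (PySem.Chars.find (c :: rest) tok = -1 ∨ tok = []) := by
            simp only [not_or]
            exact ⟨by rw [hfind]; decide, htok⟩
          rw [dif_neg this, hfind]
          simp
        rw [hsplit]
        cases hsf : pvSplitF tok (List.drop tok.length (c :: rest)) with
        | nil => exact absurd hsf (pvSplitF_ne_nil _ _)
        | cons x xs => simp [pvModHead]
      · rw [show PySem.Chars.splitOn.go tok (m + 1) (c :: rest) cur acc =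
          PySem.Chars.splitOn.go tok m rest (c :: cur) acc from by
            rw [PySem.Chars.splitOn.go]; simp [hp]]
        have hlt : rest.length < m := by simp at h; omega
        rw [ih rest (c :: cur) acc hlt]
        rw [pvSplitF_cons tok htok c rest hp]
        cases hsf : pvSplitF tok rest with
        | nil => exact absurd hsf (pvSplitF_ne_nil _ _)
        | cons x xs => simp [pvModHead]

lemma pv_splitOn_eq (tok s : List Char) (htok : tok ≠ []) :
    PySem.Chars.splitOn s tok = pvSplitF tok s := by
  have := pv_splitOn_go_eq tok htok (s.length + 1) s [] [] (by omega)
  rw [PySem.Chars.splitOn, this]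
  cases hsf : pvSplitF tok s with
  | nil => exact absurd hsf (pvSplitF_ne_nil _ _)
  | cons x xs => simp [pvModHead]

lemma pvBLoop_eq (s tok : List Char) (htok : tok ≠ []) :
    ∀ (fuel pos : Nat) (acc : List (List Char)), tok <+: s.drop pos → s.length - pos < fuel →
      pvBLoop s tok fuel pos acc =
        acc ++ (pvSplitF tok (s.drop (pos + tok.length))).map (fun f => tok ++ f) := by
  intro fuel
  induction fuel with
  | zero => intro pos acc _ h; omega
  | succ m ih =>
    intro pos acc hocc hfu
    have htk : 0 < tok.length := List.length_pos_of_ne_nil htok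
    have hple : pos + tok.length ≤ s.length := by
      have := hocc.length_le
      simp only [List.length_drop] at this
      omega
    have hcast : ((pos : Int) + (tok.length : Int)) = ((pos + tok.length : Nat) : Int) := by push_cast; ring
    rw [pvBLoop]
    simp only [hcast]
    rw [PySem.Chars.findFrom_natCast s tok (pos + tok.length) hple]
    set r := s.drop (pos + tok.length) with hr
    have hdp : s.drop pos = tok ++ r := by
      obtain ⟨t, ht⟩ := hocc
      have hrt : r = t := by
        rw [hr, ← List.drop_drop, ← ht, List.drop_left]
      rw [← ht, hrt]
    by_cases hf : PySem.Chars.find r tok = -1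
    · rw [if_pos hf, if_pos rfl]
      have hsr : pvSplitF tok r = [r] := by rw [pvSplitF]; simp [hf]
      rw [hsr, hdp]
      simp
    · have hnn : 0 ≤ PySem.Chars.find r tok := by
        rcases (PySem.Chars.neg_one_le_find r tok).lt_or_eq with h' | h'
        · omega
        · exact absurd h'.symm hf
      set j := (PySem.Chars.find r tok).toNat with hj
      have hsp := PySem.Chars.find_spec (s := r) (sub := tok) hnn
      have hjlen : j + tok.length ≤ r.length := by
        have := hsp.1.length_le
        simp only [List.length_drop] at this
        omega
      have hrlen : r.length = s.length - (pos + tok.length) := by rw [hr, List.length_drop]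
      have hne2 : ¬ ((pos + tok.length : Nat) : Int) + PySem.Chars.find r tok = -1 := by omega
      rw [if_neg hf, if_neg hne2]
      have htn : (((pos + tok.length : Nat) : Int) + PySem.Chars.find r tok).toNat = pos + tok.length + j := by omega
      rw [htn]
      have hocc2 : tok <+: s.drop (pos + tok.length + j) := by
        rw [← List.drop_drop, ← hr]
        exact hsp.1
      have hfu2 : s.length - (pos + tok.length + j) < m := by omega
      rw [ih (pos + tok.length + j) _ hocc2 hfu2]
      have hslice : PySem.List.slice s (some ((pos : Nat) : Int)) (some (((pos + tok.length : Nat) : Int) + PySem.Chars.find r tok)) = tok ++ r.take j := by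
        rw [show ((pos + tok.length : Nat) : Int) + PySem.Chars.find r tok = ((pos + tok.length + j : Nat) : Int) from by omega]
        rw [PySem.List.slice_natCast]
        rw [hdp, show pos + tok.length + j - pos = tok.length + j from by omega]
        rw [List.take_append]
        rw [List.take_of_length_le (by omega)]
        congr 1
        congr 1
        omega
      rw [hslice]
      have hsplit : pvSplitF tok r = r.take j :: pvSplitF tok (r.drop (j + tok.length)) := by
        rw [pvSplitF]
        have hne : ¬ (PySem.Chars.find r tok = -1 ∨ tok = []) := by
          simp only [not_or]
          exact ⟨hf, htok⟩
        rw [dif_neg hne]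
      have hrd : r.drop (j + tok.length) = s.drop (pos + tok.length + j + tok.length) := by
        rw [hr, List.drop_drop]
        congr 1
        omega
      rw [← hrd, hsplit]
      simp

lemma pv_main (file_content : String) (tok : List Char) (htok : tok ≠ [])
    (hA : (if PySem.Str.isIn "Input orientation:" file_content then "Input orientation:".toList
           else "Standard orientation:".toList) = tok)
    (hB : (if PySem.Chars.find file_content.toList "Input orientation:".toList = -1
            then ("Standard orientation:".toList, PySem.Chars.find file_content.toList "Standard orientation:".toList)
            else ("Input orientation:".toList, PySem.Chars.find file_content.toList "Input orientation:".toList))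
          = (tok, PySem.Chars.find file_content.toList tok)) :
    split_raw_gaussian_blocks_py file_content = split_raw_gaussian_blocks_py_alt file_content := by
  unfold split_raw_gaussian_blocks_py split_raw_gaussian_blocks_py_alt
  simp only [hA, hB]
  set s := file_content.toList with hs
  by_cases hf : PySem.Chars.find s tok = -1
  · have hsr : pvSplitF tok s = [s] := by rw [pvSplitF]; simp [hf]
    rw [pv_splitOn_eq tok s htok, hsr]
    simp [hs]
    exact fun hcon => absurd hf hcon
  · have hnn : 0 ≤ PySem.Chars.find s tok := by
      rcases (PySem.Chars.neg_one_le_find s tok).lt_or_eq with h' | h'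
      · omega
      · exact absurd h'.symm hf
    set j := (PySem.Chars.find s tok).toNat with hj
    have hsp := PySem.Chars.find_spec (s := s) (sub := tok) hnn
    have hsplit : pvSplitF tok s = s.take j :: pvSplitF tok (s.drop (j + tok.length)) := by
      rw [pvSplitF]; simp [hf, htok, ← hj]
    rw [pv_splitOn_eq tok s htok, hsplit]
    have hloop := pvBLoop_eq s tok htok (s.length + 1) j [] hsp.1 (by omega)
    rw [hloop, PySem.List.slice_to s hnn]
    simp [hf, ← hj]

-- ===== VERDICT (by name: the statement is the Claim_ definition above) =====
theorem split_raw_gaussian_blocks_py_spec : Claim_equal_split_raw_gaussian_blocks_py := by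
  intro file_content _
  unfold Spec_split_raw_gaussian_blocks_py
  by_cases hin : PySem.Str.isIn "Input orientation:" file_content = true
  · refine (pv_main file_content "Input orientation:".toList (by decide) (by rw [if_pos hin]) ?_)
    have hni : ¬ PySem.Chars.find file_content.toList "Input orientation:".toList = -1 := by
      rw [PySem.Chars.find_eq_neg_one_iff]
      simpa using (PySem.Str.isIn_iff_infix _ _).mp hin
    rw [if_neg hni]
  · refine (pv_main file_content "Standard orientation:".toList (by decide) (by rw [if_neg hin]) ?_)
    have hyi : PySem.Chars.find file_content.toList "Input orientation:".toList = -1 := by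
      rw [PySem.Chars.find_eq_neg_one_iff]
      intro h
      exact hin ((PySem.Str.isIn_iff_infix _ _).mpr (by simpa using h))
    rw [if_pos hyi]
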